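-- pv_equiv track=rewrite | github.com/jasonchen77/Artificial-Intelligence-Projects | H3/nqueens.py | f
-- ===== SOURCE A (Python) =====
-- def f(state):
--     f = 0
--     for s in range(len(state)):
--
--         horizontalAttack = False
--         leftDiagnalAttack = False
--
--         #check horizontal queens
--         for s1 in range(len(state)):
--             if s == s1:
--                 continue
--             if state[s] == state[s1]:
--                 f += 1
--                 horizontalAttack = True
--                 break
--
--         #check left diagonal queens
--         if horizontalAttack == False:
--             for s2 in range(len(state)):
--                 if s == s2:
--                     continue
--                 if ((state[s]-s) == (state[s2]-s2)):
--                     f += 1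
--                     leftDiagnalAttack = True
--                     break
--
--         #check right diagonal queens
--         if ((horizontalAttack == False) and (leftDiagnalAttack == False)):
--             for s3 in range(len(state)):
--                 if s == s3:
--                     continue
--                 if ((state[s]+s) == (state[s3]+s3)):
--                     f += 1
--                     break
--
--     return f
-- ===== SOURCE B (Python) =====
-- def _counts(keys):
--     d = {}
--     for k in keys:
--         d[k] = d.get(k, 0) + 1
--     return d
--
-- def f(state):
--     rows = _counts(state)
--     ldiag = _counts([v - i for i, v in enumerate(state)])
--     rdiag = _counts([v + i for i, v in enumerate(state)])
--     attacked = 0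
--     for i, v in enumerate(state):
--         if rows[v] > 1 or ldiag[v - i] > 1 or rdiag[v + i] > 1:
--             attacked += 1
--     return attacked
-- ===== Notes on version B (the rewrite author's own statement) =====
-- stated objective: faster
-- what changed: Replaced the three O(n) inner scans per queen by three occurrence-count dictionaries (row, left diagonal, right diagonal) built in one pass each, then each queen is checked by three O(1) lookups.
import Mathlib
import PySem

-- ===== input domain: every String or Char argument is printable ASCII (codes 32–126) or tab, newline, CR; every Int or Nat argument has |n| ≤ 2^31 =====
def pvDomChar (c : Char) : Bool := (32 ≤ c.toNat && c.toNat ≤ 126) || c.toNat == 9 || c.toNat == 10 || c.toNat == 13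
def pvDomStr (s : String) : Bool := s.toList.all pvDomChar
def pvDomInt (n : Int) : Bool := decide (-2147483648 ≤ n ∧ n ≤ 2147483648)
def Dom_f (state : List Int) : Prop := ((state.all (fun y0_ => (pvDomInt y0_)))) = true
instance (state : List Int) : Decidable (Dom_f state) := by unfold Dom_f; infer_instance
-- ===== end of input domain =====

-- B replaces A's three O(n) inner scans per queen by occurrence-count dictionaries
-- built once, so each queen is checked by three O(1) lookups (asymptotically faster).

-- ===== PORT A =====
-- Each of A's three inner `for … if s == s_k: continue … break` loops is this scan
-- (same loop, same branch order), instantiated with the compared expression `key`.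
def scanA (key : Nat → Int) (s : Nat) : List Nat → Bool
  | [] => false
  | i :: rest =>
      if i = s then scanA key s rest
      else if key s = key i then true
      else scanA key s rest

def f (state : List Int) : Int :=
  (List.range state.length).foldl (fun acc s =>
    let horizontalAttack := scanA (fun j => state.getD j 0) s (List.range state.length)
    if horizontalAttack then acc + 1
    else
      let leftDiagnalAttack := scanA (fun j => state.getD j 0 - (j : Int)) s (List.range state.length)
      if leftDiagnalAttack then acc + 1
      else if scanA (fun j => state.getD j 0 + (j : Int)) s (List.range state.length) then acc + 1
      else acc) 0

-- ===== PORT B =====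
-- _counts(keys): a dict counting occurrences of each key
def counts (keys : List Int) : PySem.Dict Int Int :=
  keys.foldl (fun d k => d.insert k (d.getD k 0 + 1)) PySem.Dict.empty

def f_alt (state : List Int) : Int :=
  let rows := counts state
  let ldiag := counts ((PySem.List.enumerate state 0).map (fun p => p.2 - p.1))
  let rdiag := counts ((PySem.List.enumerate state 0).map (fun p => p.2 + p.1))
  (PySem.List.enumerate state 0).foldl (fun acc p =>
    if rows.getD p.2 0 > 1 || ldiag.getD (p.2 - p.1) 0 > 1 || rdiag.getD (p.2 + p.1) 0 > 1
    then acc + 1 else acc) 0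

-- ===== PRECONDITION & SPEC =====
def Spec_f (state : List Int) (out : Int) : Prop := out = f_alt state
instance (state : List Int) (out : Int) : Decidable (Spec_f state out) := by unfold Spec_f; infer_instance

-- ===== CLAIM (what is proved, stated in full; the proofs are below) =====
def Claim_equal_f : Prop := ∀ (state : List Int), Dom_f state → Spec_f state (f state)

-- ===== LEMMAS AND PROOFS =====

-- scanA finds a match iff some other index in the scanned list has the same key
theorem scanA_eq_true_iff (key : Nat → Int) (s : Nat) (l : List Nat) :
    scanA key s l = true ↔ ∃ i ∈ l, i ≠ s ∧ key i = key s := by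
  induction l with
  | nil => simp [scanA]
  | cons i rest ih =>
      simp only [scanA]
      split_ifs with his hk
      · subst his
        rw [ih]
        constructor
        · rintro ⟨j, hj, ha, hb⟩; exact ⟨j, List.mem_cons_of_mem _ hj, ha, hb⟩
        · rintro ⟨j, hj, ha, hb⟩
          rcases List.mem_cons.1 hj with h | h
          · exact absurd h ha
          · exact ⟨j, h, ha, hb⟩
      · simp only [true_iff]
        exact ⟨i, List.mem_cons_self, his, hk.symm⟩
      · rw [ih]
        constructor
        · rintro ⟨j, hj, ha, hb⟩; exact ⟨j, List.mem_cons_of_mem _ hj, ha, hb⟩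
        · rintro ⟨j, hj, ha, hb⟩
          rcases List.mem_cons.1 hj with h | h
          · subst h; exact absurd hb.symm hk
          · exact ⟨j, h, ha, hb⟩

-- in a Nodup list containing s with p s, countP p exceeds 1 iff p holds elsewhere
theorem one_lt_countP_iff {α : Type} [DecidableEq α] (l : List α) (p : α → Bool)
    (hnd : l.Nodup) (s : α) (hs : s ∈ l) (hps : p s = true) :
    1 < l.countP p ↔ ∃ i ∈ l, i ≠ s ∧ p i := by
  have hperm : l.Perm (s :: l.erase s) := List.perm_cons_erase hs
  rw [hperm.countP_eq]
  simp [hps]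
  constructor
  · rintro ⟨i, hi, hpi⟩
    exact ⟨i, List.mem_of_mem_erase hi, ((List.Nodup.mem_erase_iff hnd).1 hi).1, hpi⟩
  · rintro ⟨i, hi, his, hpi⟩
    exact ⟨i, (List.Nodup.mem_erase_iff hnd).2 ⟨his, hi⟩, hpi⟩

-- count of h s in (range n).map h exceeds 1 iff another index has the same key
theorem one_lt_count_map_range_iff (n : Nat) (h : Nat → Int) (s : Nat) (hs : s < n) :
    1 < ((List.range n).map h).count (h s) ↔ ∃ i ∈ List.range n, i ≠ s ∧ h i = h s := by
  have hfun : ((fun x => x == h s) ∘ h) = (fun i => decide (h i = h s)) := by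
    funext a; rw [Bool.eq_iff_iff]; simp
  rw [List.count, List.countP_map, hfun]
  rw [one_lt_countP_iff (List.range n) _ List.nodup_range s (List.mem_range.2 hs) (by simp)]
  simp

-- the counting dict looks up the multiplicity of each key
theorem counts_getD (keys : List Int) (v : Int) : (counts keys).getD v 0 = keys.count v := by
  unfold counts
  rw [PySem.Dict.getD_foldl_insert_add_one]
  simp

-- enumerate as a map over range
theorem enumerate_eq_map_range (state : List Int) :
    PySem.List.enumerate state 0 = (List.range state.length).map (fun (j : Nat) => ((j : Int), state.getD j 0)) := by
  apply List.ext_getElem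
  · simp [PySem.List.length_enumerate]
  · intro k h1 h2
    have hk : k < state.length := by simpa [PySem.List.length_enumerate] using h1
    simp [PySem.List.getElem_enumerate, List.getD_eq_getElem?_getD, List.getElem?_eq_getElem hk]

-- state as a map over range
theorem state_eq_map_range (state : List Int) :
    state = (List.range state.length).map (fun j => state.getD j 0) := by
  apply List.ext_getElem
  · simp
  · intro k h1 h2
    simp [List.getD_eq_getElem?_getD, List.getElem?_eq_getElem h1]

-- ===== VERDICT (by name: the statement is the Claim_ definition above) =====
theorem f_spec : Claim_equal_f := by
  intro state _
  unfold Spec_f f f_alt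
  set n := state.length with hn
  set kr : Nat → Int := fun j => state.getD j 0 with hkr
  set kl : Nat → Int := fun j => state.getD j 0 - (j : Int) with hkl
  set kd : Nat → Int := fun j => state.getD j 0 + (j : Int) with hkd
  -- A\'s step function as a single boolean test
  have hstep : (fun (acc : Int) s =>
      let horizontalAttack := scanA kr s (List.range n)
      if horizontalAttack then acc + 1
      else
        let leftDiagnalAttack := scanA kl s (List.range n)
        if leftDiagnalAttack then acc + 1
        else if scanA kd s (List.range n) then acc + 1
        else acc)
      = (fun (acc : Int) s =>
          if scanA kr s (List.range n) || scanA kl s (List.range n) || scanA kd s (List.range n)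
          then acc + 1 else acc) := by
    funext acc s
    by_cases h1 : scanA kr s (List.range n) <;>
      by_cases h2 : scanA kl s (List.range n) <;>
      by_cases h3 : scanA kd s (List.range n) <;> simp [h1, h2, h3]
  rw [hstep, PySem.List.foldl_count_if]
  rw [enumerate_eq_map_range state, ← hn, List.foldl_map]
  rw [PySem.List.foldl_count_if]
  simp only [zero_add]
  refine congrArg (fun m : Nat => ((m : Int))) (List.countP_congr ?_)
  intro s hsmem
  have hs : s < n := List.mem_range.1 hsmem
  have hscan : ∀ key : Nat → Int,
      (scanA key s (List.range n) = true ↔ 1 < ((List.range n).map key).count (key s)) :=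
    fun key => (scanA_eq_true_iff key s _).trans (one_lt_count_map_range_iff n key s hs).symm
  have hrows : (counts state).getD (kr s) 0 = ((List.range n).map kr).count (kr s) := by
    rw [counts_getD]; conv_lhs => rw [state_eq_map_range state]
  have hld : (counts (List.map (fun p => p.2 - p.1)
        (List.map (fun (j : Nat) => ((j : Int), state.getD j 0)) (List.range n)))).getD (kl s) 0
      = ((List.range n).map kl).count (kl s) := by
    rw [counts_getD, List.map_map]
    rfl
  have hrd : (counts (List.map (fun p => p.2 + p.1)
        (List.map (fun (j : Nat) => ((j : Int), state.getD j 0)) (List.range n)))).getD (kd s) 0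
      = ((List.range n).map kd).count (kd s) := by
    rw [counts_getD, List.map_map]
    rfl
  simp only [Bool.or_eq_true, decide_eq_true_eq]
  rw [hscan kr, hscan kl, hscan kd]
  have h1 : (1 < List.count (kr s) (List.map kr (List.range n)))
      ↔ ((counts state).getD (state.getD s 0) 0 > 1) := by
    rw [show (counts state).getD (state.getD s 0) 0 = (counts state).getD (kr s) 0 from rfl, hrows]
    exact_mod_cast Iff.rfl
  have h2 : (1 < List.count (kl s) (List.map kl (List.range n)))
      ↔ ((counts (List.map (fun p => p.2 - p.1)
          (List.map (fun (j : Nat) => ((j : Int), state.getD j 0)) (List.range n)))).getD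
          (state.getD s 0 - (s : Int)) 0 > 1) := by
    rw [show (counts (List.map (fun p => p.2 - p.1)
          (List.map (fun (j : Nat) => ((j : Int), state.getD j 0)) (List.range n)))).getD
          (state.getD s 0 - (s : Int)) 0
        = (counts (List.map (fun p => p.2 - p.1)
          (List.map (fun (j : Nat) => ((j : Int), state.getD j 0)) (List.range n)))).getD (kl s) 0 from rfl, hld]
    exact_mod_cast Iff.rfl
  have h3 : (1 < List.count (kd s) (List.map kd (List.range n)))
      ↔ ((counts (List.map (fun p => p.2 + p.1)
          (List.map (fun (j : Nat) => ((j : Int), state.getD j 0)) (List.range n)))).getD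
          (state.getD s 0 + (s : Int)) 0 > 1) := by
    rw [show (counts (List.map (fun p => p.2 + p.1)
          (List.map (fun (j : Nat) => ((j : Int), state.getD j 0)) (List.range n)))).getD
          (state.getD s 0 + (s : Int)) 0
        = (counts (List.map (fun p => p.2 + p.1)
          (List.map (fun (j : Nat) => ((j : Int), state.getD j 0)) (List.range n)))).getD (kd s) 0 from rfl, hrd]
    exact_mod_cast Iff.rfl
  rw [h1, h2, h3]
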